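-- pv_equiv track=rewrite | github.com/bdeland/TowerIQ | src/tower_iq/gui/pages/connection_page.py | _detect_emulator_type
-- ===== SOURCE A (Python) =====
-- def _detect_emulator_type(emulator: dict) -> str:
--     """
--     Detect specific emulator type based on device properties.
--
--     Args:
--         emulator: Device information dictionary
--
--     Returns:
--         String indicating emulator type or "Physical"
--     """
--     is_emulator = emulator.get('is_emulator', False)
--     if not is_emulator:
--         return "Physical"
--
--     # Get device properties for emulator detection
--     model = emulator.get('model', '').lower()
--     device_name = emulator.get('device_name', '').lower()
--     manufacturer = emulator.get('manufacturer', '').lower()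
--
--     # Check for specific emulator types
--     if any(keyword in model or keyword in device_name or keyword in manufacturer
--            for keyword in ['mumu', 'mumuglobal']):
--         return "MuMu"
--     elif any(keyword in model or keyword in device_name
--             for keyword in ['bluestacks', 'bst']):
--         return "BlueStacks"
--     elif any(keyword in model or keyword in device_name
--             for keyword in ['nox', 'noxplayer']):
--         return "Nox"
--     elif any(keyword in model or keyword in device_name
--             for keyword in ['ldplayer', 'ld']):
--         return "LDPlayer"
--     elif any(keyword in model or keyword in device_name
--             for keyword in ['genymotion', 'geny']):
--         return "Genymotion"
--     elif any(keyword in model or keyword in device_name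
--             for keyword in ['sdk', 'emulator', 'generic']):
--         return "Android Emulator"
--     else:
--         return "Emulator"
-- ===== SOURCE B (Python) =====
-- # B: instead of an ordered if/elif cascade with first-match-wins groups, flatten all
-- # keywords into one map keyword -> (priority, searches-manufacturer) and make a single
-- # exhaustive pass computing the MINIMUM priority among all matching keywords; the label
-- # is then looked up by that priority.  Correct because A's group order equals the
-- # priority order, so the first matching group is exactly the minimum matching priority.
-- _KEYWORDS = {
--     "mumu": (0, True), "mumuglobal": (0, True),
--     "bluestacks": (1, False), "bst": (1, False),
--     "nox": (2, False), "noxplayer": (2, False),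
--     "ldplayer": (3, False), "ld": (3, False),
--     "genymotion": (4, False), "geny": (4, False),
--     "sdk": (5, False), "emulator": (5, False), "generic": (5, False),
-- }
-- _LABELS = ("MuMu", "BlueStacks", "Nox", "LDPlayer", "Genymotion", "Android Emulator", "Emulator")
--
--
-- def _detect_emulator_type(emulator: dict) -> str:
--     if not emulator.get('is_emulator', False):
--         return "Physical"
--     model = emulator.get('model', '').lower()
--     device_name = emulator.get('device_name', '').lower()
--     manufacturer = emulator.get('manufacturer', '').lower()
--     best = 6
--     for kw, (pri, use_manu) in _KEYWORDS.items():
--         if pri < best and (kw in model or kw in device_name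
--                            or (use_manu and kw in manufacturer)):
--             best = pri
--     return _LABELS[best]
-- ===== Notes on version B (the rewrite author's own statement) =====
-- stated objective: alternative
-- what changed: Replaced the first-match-wins if/elif cascade of keyword groups by one exhaustive pass over a flat keyword->(priority,manufacturer-flag) map that keeps the minimum matching priority and indexes a label table with it.
import Mathlib
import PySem

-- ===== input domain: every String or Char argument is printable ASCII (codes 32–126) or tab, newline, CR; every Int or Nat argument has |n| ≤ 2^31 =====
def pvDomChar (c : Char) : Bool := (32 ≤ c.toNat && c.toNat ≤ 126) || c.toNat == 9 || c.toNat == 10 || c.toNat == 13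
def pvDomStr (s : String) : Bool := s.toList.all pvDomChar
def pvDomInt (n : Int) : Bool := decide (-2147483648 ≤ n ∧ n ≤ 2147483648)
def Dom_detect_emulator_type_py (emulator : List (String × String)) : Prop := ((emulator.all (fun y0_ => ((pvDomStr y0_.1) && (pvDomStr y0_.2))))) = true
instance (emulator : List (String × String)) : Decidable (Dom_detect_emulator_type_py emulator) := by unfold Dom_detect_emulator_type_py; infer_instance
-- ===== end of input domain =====

-- B replaces A's first-match if/elif cascade by one exhaustive min-priority pass over a flat keyword map (objective: alternative).


-- ===== PORT A =====
-- Python truthiness of emulator.get('is_emulator', False): missing key or "" is falsy, any other string truthy.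
def detect_emulator_type_py (emulator : List (String × String)) : String :=
  let d := PySem.Dict.mk emulator
  let is_emulator : Bool := match d.get? "is_emulator" with
    | none => false
    | some s => s != ""
  if !is_emulator then "Physical"
  else
    let model := PySem.Str.lower (d.getD "model" "")
    let device_name := PySem.Str.lower (d.getD "device_name" "")
    let manufacturer := PySem.Str.lower (d.getD "manufacturer" "")
    if ["mumu", "mumuglobal"].any (fun k =>
        PySem.Str.isIn k model || PySem.Str.isIn k device_name || PySem.Str.isIn k manufacturer) then
      "MuMu"
    else if ["bluestacks", "bst"].any (fun k =>
        PySem.Str.isIn k model || PySem.Str.isIn k device_name) then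
      "BlueStacks"
    else if ["nox", "noxplayer"].any (fun k =>
        PySem.Str.isIn k model || PySem.Str.isIn k device_name) then
      "Nox"
    else if ["ldplayer", "ld"].any (fun k =>
        PySem.Str.isIn k model || PySem.Str.isIn k device_name) then
      "LDPlayer"
    else if ["genymotion", "geny"].any (fun k =>
        PySem.Str.isIn k model || PySem.Str.isIn k device_name) then
      "Genymotion"
    else if ["sdk", "emulator", "generic"].any (fun k =>
        PySem.Str.isIn k model || PySem.Str.isIn k device_name) then
      "Android Emulator"
    else
      "Emulator"

-- ===== PORT B =====
-- flat keyword map: keyword -> (priority, also-search-manufacturer)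
def pvKeywords : List (String × Nat × Bool) :=
  [("mumu", 0, true), ("mumuglobal", 0, true),
   ("bluestacks", 1, false), ("bst", 1, false),
   ("nox", 2, false), ("noxplayer", 2, false),
   ("ldplayer", 3, false), ("ld", 3, false),
   ("genymotion", 4, false), ("geny", 4, false),
   ("sdk", 5, false), ("emulator", 5, false), ("generic", 5, false)]

def pvLabels : List String :=
  ["MuMu", "BlueStacks", "Nox", "LDPlayer", "Genymotion", "Android Emulator", "Emulator"]

def detect_emulator_type_py_alt (emulator : List (String × String)) : String :=
  let d := PySem.Dict.mk emulator
  let is_emulator : Bool := match d.get? "is_emulator" with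
    | none => false
    | some s => s != ""
  if !is_emulator then "Physical"
  else
    let model := PySem.Str.lower (d.getD "model" "")
    let device_name := PySem.Str.lower (d.getD "device_name" "")
    let manufacturer := PySem.Str.lower (d.getD "manufacturer" "")
    let best := pvKeywords.foldl (fun best kpu =>
      if kpu.2.1 < best && (PySem.Str.isIn kpu.1 model || PySem.Str.isIn kpu.1 device_name
          || (kpu.2.2 && PySem.Str.isIn kpu.1 manufacturer)) then kpu.2.1 else best) 6
    pvLabels.getD best "Emulator"

-- ===== PRECONDITION & SPEC =====
def Spec_detect_emulator_type_py (emulator : List (String × String)) (out : String) : Prop := out = detect_emulator_type_py_alt emulator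
instance (emulator : List (String × String)) (out : String) : Decidable (Spec_detect_emulator_type_py emulator out) := by unfold Spec_detect_emulator_type_py; infer_instance

-- ===== CLAIM (what is proved, stated in full; the proofs are below) =====
def Claim_equal_detect_emulator_type_py : Prop := ∀ (emulator : List (String × String)), Dom_detect_emulator_type_py emulator → Spec_detect_emulator_type_py emulator (detect_emulator_type_py emulator)

-- ===== LEMMAS AND PROOFS =====
-- abstract form of the equivalence: first-match cascade over 6 groups = label of the
-- minimum priority among matching keywords, with the 13 per-keyword hits as free booleans
theorem pv_table (b1 b2 b3 b4 b5 b6 b7 b8 b9 b10 b11 b12 b13 : Bool) :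
    (if b1 || b2 then "MuMu"
     else if b3 || b4 then "BlueStacks"
     else if b5 || b6 then "Nox"
     else if b7 || b8 then "LDPlayer"
     else if b9 || b10 then "Genymotion"
     else if b11 || b12 || b13 then "Android Emulator"
     else "Emulator")
    = pvLabels.getD
        (([(0, b1), (0, b2), (1, b3), (1, b4), (2, b5), (2, b6), (3, b7), (3, b8),
           (4, b9), (4, b10), (5, b11), (5, b12), (5, b13)] : List (Nat × Bool)).foldl
          (fun best p => if p.1 < best && p.2 then p.1 else best) 6) "Emulator" := by
  revert b1 b2 b3 b4 b5 b6 b7 b8 b9 b10 b11 b12 b13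
  decide

-- per-keyword (priority, hit) pair, matching the loop condition of B
def pvPair (model device_name manufacturer : String) (kpu : String × Nat × Bool) : Nat × Bool :=
  (kpu.2.1, PySem.Str.isIn kpu.1 model || PySem.Str.isIn kpu.1 device_name
      || (kpu.2.2 && PySem.Str.isIn kpu.1 manufacturer))

theorem pv_core_eq (model device_name manufacturer : String) :
    (if ["mumu", "mumuglobal"].any (fun k =>
        PySem.Str.isIn k model || PySem.Str.isIn k device_name || PySem.Str.isIn k manufacturer) then
      "MuMu"
    else if ["bluestacks", "bst"].any (fun k =>
        PySem.Str.isIn k model || PySem.Str.isIn k device_name) then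
      "BlueStacks"
    else if ["nox", "noxplayer"].any (fun k =>
        PySem.Str.isIn k model || PySem.Str.isIn k device_name) then
      "Nox"
    else if ["ldplayer", "ld"].any (fun k =>
        PySem.Str.isIn k model || PySem.Str.isIn k device_name) then
      "LDPlayer"
    else if ["genymotion", "geny"].any (fun k =>
        PySem.Str.isIn k model || PySem.Str.isIn k device_name) then
      "Genymotion"
    else if ["sdk", "emulator", "generic"].any (fun k =>
        PySem.Str.isIn k model || PySem.Str.isIn k device_name) then
      "Android Emulator"
    else
      "Emulator")
    = pvLabels.getD (pvKeywords.foldl (fun best kpu =>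
        if kpu.2.1 < best && (PySem.Str.isIn kpu.1 model || PySem.Str.isIn kpu.1 device_name
            || (kpu.2.2 && PySem.Str.isIn kpu.1 manufacturer)) then kpu.2.1 else best) 6) "Emulator" := by
  have hfold : (pvKeywords.map (pvPair model device_name manufacturer)).foldl
        (fun best p => if p.1 < best && p.2 then p.1 else best) 6
      = pvKeywords.foldl (fun best kpu =>
          if kpu.2.1 < best && (PySem.Str.isIn kpu.1 model || PySem.Str.isIn kpu.1 device_name
              || (kpu.2.2 && PySem.Str.isIn kpu.1 manufacturer)) then kpu.2.1 else best) 6 := by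
    rw [List.foldl_map]; rfl
  rw [← hfold]
  have hmap : pvKeywords.map (pvPair model device_name manufacturer)
      = [(0, PySem.Str.isIn "mumu" model || (PySem.Str.isIn "mumu" device_name || PySem.Str.isIn "mumu" manufacturer)),
         (0, PySem.Str.isIn "mumuglobal" model || (PySem.Str.isIn "mumuglobal" device_name || PySem.Str.isIn "mumuglobal" manufacturer)),
         (1, PySem.Str.isIn "bluestacks" model || PySem.Str.isIn "bluestacks" device_name),
         (1, PySem.Str.isIn "bst" model || PySem.Str.isIn "bst" device_name),
         (2, PySem.Str.isIn "nox" model || PySem.Str.isIn "nox" device_name),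
         (2, PySem.Str.isIn "noxplayer" model || PySem.Str.isIn "noxplayer" device_name),
         (3, PySem.Str.isIn "ldplayer" model || PySem.Str.isIn "ldplayer" device_name),
         (3, PySem.Str.isIn "ld" model || PySem.Str.isIn "ld" device_name),
         (4, PySem.Str.isIn "genymotion" model || PySem.Str.isIn "genymotion" device_name),
         (4, PySem.Str.isIn "geny" model || PySem.Str.isIn "geny" device_name),
         (5, PySem.Str.isIn "sdk" model || PySem.Str.isIn "sdk" device_name),
         (5, PySem.Str.isIn "emulator" model || PySem.Str.isIn "emulator" device_name),
         (5, PySem.Str.isIn "generic" model || PySem.Str.isIn "generic" device_name)] := by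
    simp [pvKeywords, pvPair, Bool.or_assoc]
  rw [hmap]
  refine Eq.trans ?_ (pv_table
    (PySem.Str.isIn "mumu" model || (PySem.Str.isIn "mumu" device_name || PySem.Str.isIn "mumu" manufacturer))
    (PySem.Str.isIn "mumuglobal" model || (PySem.Str.isIn "mumuglobal" device_name || PySem.Str.isIn "mumuglobal" manufacturer))
    (PySem.Str.isIn "bluestacks" model || PySem.Str.isIn "bluestacks" device_name)
    (PySem.Str.isIn "bst" model || PySem.Str.isIn "bst" device_name)
    (PySem.Str.isIn "nox" model || PySem.Str.isIn "nox" device_name)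
    (PySem.Str.isIn "noxplayer" model || PySem.Str.isIn "noxplayer" device_name)
    (PySem.Str.isIn "ldplayer" model || PySem.Str.isIn "ldplayer" device_name)
    (PySem.Str.isIn "ld" model || PySem.Str.isIn "ld" device_name)
    (PySem.Str.isIn "genymotion" model || PySem.Str.isIn "genymotion" device_name)
    (PySem.Str.isIn "geny" model || PySem.Str.isIn "geny" device_name)
    (PySem.Str.isIn "sdk" model || PySem.Str.isIn "sdk" device_name)
    (PySem.Str.isIn "emulator" model || PySem.Str.isIn "emulator" device_name)
    (PySem.Str.isIn "generic" model || PySem.Str.isIn "generic" device_name))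
  simp only [List.any_cons, List.any_nil, Bool.or_false, Bool.or_assoc]

-- ===== VERDICT (by name: the statement is the Claim_ definition above) =====
theorem detect_emulator_type_py_spec : Claim_equal_detect_emulator_type_py := by
  intro emulator _
  unfold Spec_detect_emulator_type_py detect_emulator_type_py detect_emulator_type_py_alt
  by_cases h : (match (PySem.Dict.mk emulator).get? "is_emulator" with
      | none => false
      | some s => s != "") = true
  · simp only [h, Bool.not_true]
    exact pv_core_eq _ _ _
  · simp only [eq_false_of_ne_true (by simpa using h), Bool.not_false, if_true]
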